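-- pv_equiv track=rewrite | github.com/dsychoi/aoc2024 | day9.py | compact_puzzle
-- ===== SOURCE A (Python) =====
-- def compact_puzzle(puzzle_id):
--     while True:
--         moved = False
--         for i in range(len(puzzle_id)):
--             if puzzle_id[i] == '.':
--                 for j in range(len(puzzle_id) - 1, i, -1):
--                     if puzzle_id[j] != '.':
--                         puzzle_id[i], puzzle_id[j] = puzzle_id[j], puzzle_id[i]
--                         moved = True
--                         break
--
--         if not moved:
--             break
--
--     while puzzle_id and puzzle_id[-1] == '.':
--         puzzle_id.pop()
--
--     return puzzle_id
-- ===== SOURCE B (Python) =====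
-- # B: filter out the non-dot blocks once, then rebuild the first len(nd) cells,
-- # filling each gap from an iterator over the non-dots reversed.
-- # (A mutates its argument in place; B does not — the equivalence is about the return value.)
-- def compact_puzzle(puzzle_id):
--     nd = [x for x in puzzle_id if x != '.']
--     fills = iter(reversed(nd))
--     return [x if x != '.' else next(fills) for x in puzzle_id[:len(nd)]]
-- ===== Notes on version B (the rewrite author's own statement) =====
-- stated objective: alternative
-- what changed: Replaces A's repeated in-place passes (a left-to-right gap scan, each gap paired with a right-to-left search-and-swap) by a single filter of the non-dot blocks plus one fill pass that rebuilds the first len(nd) cells, drawing gap fillers from an iterator over the reversed non-dot list; B does not mutate its argument.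
import Mathlib
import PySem

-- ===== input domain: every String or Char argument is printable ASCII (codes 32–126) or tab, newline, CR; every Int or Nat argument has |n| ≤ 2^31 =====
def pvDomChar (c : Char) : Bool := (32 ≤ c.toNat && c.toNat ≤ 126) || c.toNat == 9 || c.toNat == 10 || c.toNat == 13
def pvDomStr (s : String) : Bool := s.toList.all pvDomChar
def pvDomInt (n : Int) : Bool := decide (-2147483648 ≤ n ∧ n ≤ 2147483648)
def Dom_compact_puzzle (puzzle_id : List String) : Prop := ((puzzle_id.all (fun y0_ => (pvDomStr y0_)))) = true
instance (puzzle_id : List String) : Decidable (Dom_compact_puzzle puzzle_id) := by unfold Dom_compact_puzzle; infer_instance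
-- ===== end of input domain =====

-- B replaces A's repeated in-place swap passes by one filter of the non-dot blocks plus one
-- fill pass over a reversed iterator (return-value equivalence: Python A mutates its argument
-- in place, B does not).

-- ===== PORT A =====
-- inner 'for j in range(len(puzzle_id) - 1, i, -1): … break' loop of A
def pvInner (c : List String) (i : Nat) (j : Nat) : List String × Bool :=
  if _h : j ≤ i then (c, false)
  else if (c.getD j "") ≠ "." then
    ((c.set i (c.getD j "")).set j (c.getD i ""), true)   -- the tuple swap, RHS read first
  else pvInner c i (j - 1)
termination_by j

-- outer 'for i in range(len(puzzle_id))' loop of A (n = len(puzzle_id), fixed at loop entry)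
def pvPassLoop (c : List String) (i : Nat) (mv : Bool) (n : Nat) : List String × Bool :=
  if _h : i < n then
    if c.getD i "" = "." then
      let r := pvInner c i (n - 1)
      pvPassLoop r.1 (i + 1) (mv || r.2) n
    else pvPassLoop c (i + 1) mv n
  else (c, mv)
termination_by n - i

def pvPass (l : List String) : List String × Bool := pvPassLoop l 0 false l.length

-- 'while True: … if not moved: break'; the fuel only makes the loop total,
-- the proofs show the loop always stops within the given fuel
def pvWhile : Nat → List String → List String
  | 0, l => l
  | fuel + 1, l =>
    let r := pvPass l
    if r.2 then pvWhile fuel r.1 else r.1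

-- 'while puzzle_id and puzzle_id[-1] == '.': puzzle_id.pop()'
def pvTrim (l : List String) : List String :=
  if _h : l ≠ [] ∧ l.getLastD "" = "." then pvTrim l.dropLast else l
termination_by l.length
decreasing_by
  cases l with
  | nil => exact absurd rfl _h.1
  | cons a t => simp

def compact_puzzle (puzzle_id : List String) : List String :=
  pvTrim (pvWhile (puzzle_id.length + 2) puzzle_id)

-- ===== PORT B =====
-- the list comprehension of B: walk puzzle_id[:len(nd)], a '.' takes next(fills);
-- next() is never called on an exhausted iterator (the [] branch is unreachable)
def pvFill : List String → List String → List String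
  | [], _ => []
  | x :: t, fills =>
    if x ≠ "." then x :: pvFill t fills
    else match fills with
      | f :: rest => f :: pvFill t rest
      | [] => []

def compact_puzzle_alt (puzzle_id : List String) : List String :=
  let nd := puzzle_id.filter (fun x => x ≠ ".")
  pvFill (puzzle_id.take nd.length) nd.reverse

-- ===== PRECONDITION & SPEC =====
def Spec_compact_puzzle (puzzle_id : List String) (out : List String) : Prop := out = compact_puzzle_alt puzzle_id
instance (puzzle_id : List String) (out : List String) : Decidable (Spec_compact_puzzle puzzle_id out) := by unfold Spec_compact_puzzle; infer_instance

-- ===== CLAIM (what is proved, stated in full; the proofs are below) =====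
def Claim_equal_compact_puzzle : Prop := ∀ (puzzle_id : List String), Dom_compact_puzzle puzzle_id → Spec_compact_puzzle puzzle_id (compact_puzzle puzzle_id)

-- ===== LEMMAS AND PROOFS =====

-- rmR xs = remove the rightmost non-"." element of xs, replacing it by "."
def rmR : List String → Option (String × List String)
  | [] => none
  | x :: xs =>
    match rmR xs with
    | some (y, t) => some (y, x :: t)
    | none => if x ≠ "." then some (x, "." :: xs) else none

theorem rmR_length : ∀ {xs : List String} {y t}, rmR xs = some (y, t) → t.length = xs.length := by
  intro xs
  induction xs with
  | nil => intro y t h; simp [rmR] at h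
  | cons x xs ih =>
    intro y t h
    simp only [rmR] at h
    cases hr : rmR xs with
    | some p =>
      obtain ⟨y', t'⟩ := p
      rw [hr] at h
      simp at h
      obtain ⟨hy, ht⟩ := h
      subst ht
      simp [ih hr]
    | none =>
      rw [hr] at h
      by_cases hx : x = "." <;> simp [hx] at h
      obtain ⟨hy, ht⟩ := h
      subst ht; simp

theorem rmR_none_iff : ∀ {xs : List String}, rmR xs = none ↔ ∀ x ∈ xs, x = "." := by
  intro xs
  induction xs with
  | nil => simp [rmR]
  | cons x xs ih =>
    simp only [rmR]
    cases hr : rmR xs with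
    | some p => simp [← ih, hr]
    | none =>
      by_cases hx : x = "." <;> simp [hx, ← ih, hr]

-- structural description of one full pass of A's outer for loop
def pvF : List String → List String × Bool
  | [] => ([], false)
  | x :: xs =>
    if x = "." then
      match hr : rmR xs with
      | some (_y, t) => (_y :: (pvF t).1, true)
      | none => (x :: (pvF xs).1, (pvF xs).2)
    else (x :: (pvF xs).1, (pvF xs).2)
termination_by l => l.length
decreasing_by
  · simp [rmR_length hr]
  · simp
  · simp

theorem pvF_nil : pvF [] = ([], false) := by simp [pvF]

theorem pvF_cons_nondot {x : String} {xs : List String} (h : x ≠ ".") :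
    pvF (x :: xs) = (x :: (pvF xs).1, (pvF xs).2) := by
  rw [pvF]; simp [h]

theorem pvF_cons_dot_some {xs t : List String} {y : String} (h : rmR xs = some (y, t)) :
    pvF ("." :: xs) = (y :: (pvF t).1, true) := by
  rw [pvF, if_pos rfl]; split <;> simp_all

theorem pvF_cons_dot_none {xs : List String} (h : rmR xs = none) :
    pvF ("." :: xs) = ("." :: (pvF xs).1, (pvF xs).2) := by
  rw [pvF, if_pos rfl]; split <;> simp_all

-- proof-side name for B's filter
def ndFilter (l : List String) : List String := l.filter (fun x => x ≠ ".")

theorem ndFilter_cons_dot (xs : List String) : ndFilter ("." :: xs) = ndFilter xs := by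
  simp [ndFilter]

theorem ndFilter_cons_nondot {x : String} (xs : List String) (h : x ≠ ".") :
    ndFilter (x :: xs) = x :: ndFilter xs := by
  simp [ndFilter, List.filter_cons, h]

theorem ndFilter_eq_nil {xs : List String} (h : ∀ z ∈ xs, z = ".") : ndFilter xs = [] := by
  rw [ndFilter, List.filter_eq_nil_iff]
  intro a ha; simpa using h a ha

theorem rmR_snoc (s : List String) (z : String) :
    rmR (s ++ [z]) = if z ≠ "." then some (z, s ++ ["."])
      else (rmR s).map (fun p => (p.1, p.2 ++ [z])) := by
  induction s with
  | nil => by_cases hz : z = "." <;> simp [rmR, hz]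
  | cons x s ih =>
    by_cases hz : z = "."
    · simp only [rmR, List.cons_append, ih]
      cases hr : rmR s with
      | some p => simp [hz]
      | none => by_cases hx : x = "." <;> simp [hx, hz]
    · simp [rmR, ih, hz]

theorem rmR_some_spec : ∀ {xs : List String} {y : String} {t : List String}, rmR xs = some (y, t) →
    y ≠ "." ∧ ndFilter t = (ndFilter xs).dropLast
      ∧ (ndFilter xs).getLast? = some y
      ∧ ∀ m, m < (ndFilter xs).length → t.take m = xs.take m := by
  intro xs
  induction xs with
  | nil => intro y t h; simp [rmR] at h
  | cons x xs ih =>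
    intro y t h
    simp only [rmR] at h
    cases hr : rmR xs with
    | some p =>
      obtain ⟨y', t'⟩ := p
      rw [hr] at h
      simp at h
      obtain ⟨hy, ht⟩ := h
      subst hy; subst ht
      obtain ⟨h1, h2, h3, h4⟩ := ih hr
      have hne : ndFilter xs ≠ [] := by
        intro hnil; rw [hnil] at h3; simp at h3
      by_cases hx : x = "."
      · subst hx
        refine ⟨h1, ?_, ?_, ?_⟩
        · rw [ndFilter_cons_dot, ndFilter_cons_dot, h2]
        · rw [ndFilter_cons_dot]; exact h3
        · intro m hm
          rw [ndFilter_cons_dot] at hm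
          cases m with
          | zero => simp
          | succ m =>
            simp only [List.take_succ_cons, List.cons.injEq, true_and]
            exact h4 m (by omega)
      · refine ⟨h1, ?_, ?_, ?_⟩
        · rw [ndFilter_cons_nondot _ hx, ndFilter_cons_nondot _ hx, h2,
            List.dropLast_cons_of_ne_nil hne]
        · rw [ndFilter_cons_nondot _ hx, List.getLast?_cons, h3]; simp
        · intro m hm
          rw [ndFilter_cons_nondot _ hx, List.length_cons] at hm
          cases m with
          | zero => simp
          | succ m =>
            simp only [List.take_succ_cons, List.cons.injEq, true_and]
            exact h4 m (by omega)
    | none =>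
      rw [hr] at h
      by_cases hx : x = "." <;> simp [hx] at h
      obtain ⟨hy, ht⟩ := h
      subst hy; subst ht
      have hall : ∀ z ∈ xs, z = "." := rmR_none_iff.mp hr
      have hfil : ndFilter xs = [] := ndFilter_eq_nil hall
      refine ⟨hx, ?_, ?_, ?_⟩
      · rw [ndFilter_cons_dot, hfil, ndFilter_cons_nondot _ hx, hfil]; simp
      · rw [ndFilter_cons_nondot _ hx, hfil]; simp
      · intro m hm
        rw [ndFilter_cons_nondot _ hx, hfil] at hm
        simp at hm
        simp [hm]

theorem set_surgery (c : List String) (i j : Nat) (y : String) (hij : i < j) (hj : j < c.length) :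
    (c.set i y).set j "." = c.take i ++ y :: (((c.take j).drop (i + 1)) ++ "." :: c.drop (j + 1)) := by
  have hlen : j < (c.set i y).length := by simpa using hj
  rw [List.set_eq_take_cons_drop _ hlen]
  have h1 : (c.set i y).take j = (c.take j).set i y := List.take_set
  have h2 : (c.set i y).drop (j + 1) = c.drop (j + 1) := by
    rw [List.drop_set]; simp [Nat.lt_succ_of_lt hij]
  have hi : i < (c.take j).length := by simp; omega
  rw [h1, h2, List.set_eq_take_cons_drop _ hi, List.take_take]
  have : min i j = i := by omega
  rw [this]
  simp

theorem pvInner_spec : ∀ (j : Nat) (c : List String) (i : Nat), j < c.length → c.getD i "" = "." →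
    pvInner c i j =
      match rmR ((c.take (j + 1)).drop (i + 1)) with
      | none => (c, false)
      | some (y, t) => (c.take i ++ y :: (t ++ c.drop (j + 1)), true) := by
  intro j
  induction j with
  | zero =>
    intro c i hj hi
    have hseg : (c.take 1).drop (i + 1) = [] :=
      List.drop_eq_nil_of_le (by simp)
    rw [pvInner, hseg]
    simp [rmR]
  | succ j ihj =>
    intro c i hj hi
    by_cases hji : j + 1 ≤ i
    · have hseg : (c.take (j + 2)).drop (i + 1) = [] :=
        List.drop_eq_nil_of_le (by simp; omega)
      rw [pvInner, hseg]
      simp [rmR, hji]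
    · obtain ⟨z, hz⟩ : ∃ z, getElem? c (j + 1) = some z := ⟨_, List.getElem?_eq_getElem hj⟩
      have hzz : getElem c (j + 1) hj = z := by
        have h2 := List.getElem?_eq_getElem hj
        rw [hz] at h2
        exact (Option.some.inj h2).symm
      have hzD : c.getD (j + 1) "" = z := by
        simp [List.getD_eq_getElem?_getD, hz]
      have htk : c.take (j + 2) = c.take (j + 1) ++ [z] := by
        rw [List.take_add_one, hz]
        rfl
      have hdropapp : (c.take (j + 2)).drop (i + 1) = ((c.take (j + 1)).drop (i + 1)) ++ [z] := by
        rw [htk, List.drop_append_of_le_length]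
        simp
        omega
      by_cases hnz : z = "."
      · -- scan continues leftwards
        rw [pvInner]
        rw [dif_neg hji, if_neg (by simp [hz, hnz])]
        have hjlt : j < c.length := by omega
        rw [show j + 1 - 1 = j from rfl, ihj c i hjlt hi, hdropapp, rmR_snoc]
        rw [if_neg (by simp [hnz])]
        have hdropc : c.drop (j + 1) = "." :: c.drop (j + 2) := by
          have h3 := List.drop_eq_getElem_cons hj
          rw [hzz, hnz] at h3
          exact h3
        cases hrm : rmR ((c.take (j + 1)).drop (i + 1)) with
        | none => simp
        | some p =>
          obtain ⟨y, t⟩ := p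
          simp [hdropc, hnz]
      · -- found the rightmost non-dot: swap
        rw [pvInner]
        rw [dif_neg hji, if_pos (by simp [hz]; simpa using hnz)]
        rw [hdropapp, rmR_snoc, if_pos (by simpa using hnz)]
        rw [hzD, hi, set_surgery c i (j + 1) _ (by omega) hj]
        simp

theorem pvPassLoop_spec : ∀ (k : Nat) (c : List String) (i : Nat) (mv : Bool), c.length - i = k →
    pvPassLoop c i mv c.length = (c.take i ++ (pvF (c.drop i)).1, mv || (pvF (c.drop i)).2) := by
  intro k
  induction k with
  | zero =>
    intro c i mv hk
    have hge : c.length ≤ i := by omega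
    rw [pvPassLoop, dif_neg (by omega)]
    rw [List.drop_eq_nil_of_le hge, pvF_nil]
    simp [List.take_of_length_le hge]
  | succ k ihk =>
    intro c i mv hk
    have hlt : i < c.length := by omega
    obtain ⟨x, hx⟩ : ∃ x, getElem? c i = some x := ⟨_, List.getElem?_eq_getElem hlt⟩
    have hxx : getElem c i hlt = x := by
      have h2 := List.getElem?_eq_getElem hlt
      rw [hx] at h2
      exact (Option.some.inj h2).symm
    have hxD : c.getD i "" = x := by simp [List.getD_eq_getElem?_getD, hx]
    have hdropi : c.drop i = x :: c.drop (i + 1) := by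
      have h3 := List.drop_eq_getElem_cons hlt
      rw [hxx] at h3
      exact h3
    have htki : c.take (i + 1) = c.take i ++ [x] := by
      rw [List.take_add_one, hx]
      rfl
    by_cases hxd : x = "."
    · -- current cell is a gap: run the inner scan
      subst hxd
      have hinner := pvInner_spec (c.length - 1) c i (by omega) hxD
      have hjj : c.length - 1 + 1 = c.length := by omega
      rw [hjj, List.take_length, List.drop_length] at hinner
      rw [pvPassLoop, dif_pos hlt, if_pos hxD]
      cases hrm : rmR (c.drop (i + 1)) with
      | none =>
        rw [hrm] at hinner
        rw [hinner]
        have := ihk c (i + 1) (mv || false) (by omega)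
        rw [this, hdropi, pvF_cons_dot_none hrm, htki]
        simp
      | some p =>
        obtain ⟨y, t⟩ := p
        rw [hrm] at hinner
        rw [hinner]
        have hlent : t.length = (c.drop (i + 1)).length := rmR_length hrm
        have hlen' : (c.take i ++ y :: (t ++ [])).length = c.length := by
          simp [hlent]
          omega
        have := ihk (c.take i ++ y :: (t ++ [])) (i + 1) (mv || true) (by rw [hlen']; omega)
        rw [hlen'] at this
        rw [this]
        have hti : (c.take i).length = i := by simp; omega
        have htake : (c.take i ++ y :: (t ++ [])).take (i + 1) = c.take i ++ [y] := by
          rw [List.take_append, List.take_of_length_le (by omega), hti]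
          simp
        have hdrop : (c.take i ++ y :: (t ++ [])).drop (i + 1) = t := by
          rw [List.drop_append, hti]
          simp
        rw [htake, hdrop, hdropi, pvF_cons_dot_some hrm]
        simp
    · -- current cell keeps its block
      rw [pvPassLoop, dif_pos hlt, if_neg (by rw [hxD]; exact hxd)]
      have := ihk c (i + 1) mv (by omega)
      rw [this, hdropi, pvF_cons_nondot hxd, htki]
      simp

theorem pvPass_eq (l : List String) : pvPass l = pvF l := by
  rw [pvPass, pvPassLoop_spec l.length l 0 false (by omega)]
  simp

theorem pvF_allDots : ∀ {l : List String}, (∀ x ∈ l, x = ".") → pvF l = (l, false) := by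
  intro l
  induction l with
  | nil => intro _; simp [pvF_nil]
  | cons x xs ih =>
    intro h
    have hx : x = "." := h x (by simp)
    subst hx
    have hall : ∀ z ∈ xs, z = "." := fun z hz => h z (by simp [hz])
    rw [pvF_cons_dot_none (rmR_none_iff.mpr hall), ih hall]

def pvNoGap : List String → Bool
  | [] => true
  | x :: xs => if x = "." then xs.all (fun z => z = ".") else pvNoGap xs

theorem pvNoGap_pvF : ∀ (l : List String), pvNoGap ((pvF l).1) = true := by
  intro l
  induction l using pvF.induct with
  | case1 => simp [pvF_nil, pvNoGap]
  | case2 xs y t hrm ih =>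
    rw [pvF_cons_dot_some hrm]
    have hy : y ≠ "." := (rmR_some_spec hrm).1
    simpa [pvNoGap, hy] using ih
  | case3 xs hrm ih =>
    have hall : ∀ z ∈ xs, z = "." := rmR_none_iff.mp hrm
    rw [pvF_cons_dot_none hrm, (pvF_allDots hall)]
    simp [pvNoGap]
    exact fun z hz => hall z hz
  | case4 x xs hx ih =>
    rw [pvF_cons_nondot hx]
    simpa [pvNoGap, hx] using ih

theorem pvF_of_noGap : ∀ {l : List String}, pvNoGap l = true → pvF l = (l, false) := by
  intro l
  induction l with
  | nil => intro _; simp [pvF_nil]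
  | cons x xs ih =>
    intro h
    by_cases hx : x = "."
    · subst hx
      simp [pvNoGap] at h
      exact pvF_allDots (by intro z hz; cases hz with
        | head => rfl
        | tail _ hz => exact h z hz)
    · simp [pvNoGap, hx] at h
      rw [pvF_cons_nondot hx, ih h]

theorem pvWhile_eq (fuel : Nat) (l : List String) : pvWhile (fuel + 2) l = (pvF l).1 := by
  rw [pvWhile]
  simp only [pvPass_eq]
  by_cases h2 : (pvF l).2
  · rw [if_pos h2, pvWhile]
    simp only [pvPass_eq, pvF_of_noGap (pvNoGap_pvF l)]
    rfl
  · rw [if_neg h2]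

theorem pvTrim_eq : ∀ (l : List String),
    pvTrim l = (List.dropWhile (fun x => x = ".") l.reverse).reverse := by
  intro l
  induction l using pvTrim.induct with
  | case1 l h ih =>
    obtain ⟨hne, hlast⟩ := h
    obtain ⟨ys, a, hya⟩ : ∃ ys a, l = ys ++ [a] := by
      rcases (List.eq_nil_or_concat l) with h0 | ⟨ys, a, h0⟩
      · exact absurd h0 hne
      · exact ⟨ys, a, by simpa using h0⟩
    subst hya
    have ha : a = "." := by simpa using hlast
    rw [pvTrim]
    rw [dif_pos ⟨hne, hlast⟩] at *
    rw [List.dropLast_concat] at ih ⊢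
    rw [ih, List.reverse_append]
    simp [ha]
  | case2 l h =>
    rw [pvTrim, dif_neg h]
    rcases (List.eq_nil_or_concat l) with h0 | ⟨ys, a, h0⟩
    · subst h0; simp
    · rw [show ys.concat a = ys ++ [a] from by simp] at h0
      subst h0
      have ha : a ≠ "." := by
        intro ha
        exact h ⟨by simp, by simpa using ha⟩
      rw [List.reverse_append]
      simp [ha]

theorem pvTrim_cons_nondot {x : String} (r : List String) (h : x ≠ ".") :
    pvTrim (x :: r) = x :: pvTrim r := by
  rw [pvTrim_eq, pvTrim_eq]
  have : (x :: r).reverse = r.reverse ++ [x] := by simp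
  rw [this, List.dropWhile_append]
  by_cases he : (List.dropWhile (fun z => z = ".") r.reverse).isEmpty
  · rw [if_pos he]
    rw [List.isEmpty_iff] at he
    simp [h, he]
  · rw [if_neg (by simpa using he)]
    simp

theorem pvTrim_allDots {l : List String} (h : ∀ x ∈ l, x = ".") : pvTrim l = [] := by
  rw [pvTrim_eq]
  have : List.dropWhile (fun x => x = ".") l.reverse = [] := by
    rw [List.dropWhile_eq_nil_iff]
    intro x hx
    simp [h x (List.mem_reverse.mp hx)]
  rw [this]
  rfl

theorem pvFill_stack : ∀ (t s : List String) (a : String), t.count "." ≤ s.length →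
    pvFill t (s ++ [a]) = pvFill t s := by
  intro t
  induction t with
  | nil => intro s a _; rfl
  | cons x t ih =>
    intro s a h
    by_cases hx : x = "."
    · subst hx
      have hcnt : t.count "." + 1 ≤ s.length := by
        have : ("." :: t).count "." = t.count "." + 1 := by simp
        omega
      cases s with
      | nil => simp at hcnt
      | cons b s' =>
        show pvFill ("." :: t) ((b :: s') ++ [a]) = pvFill ("." :: t) (b :: s')
        simp only [List.cons_append, pvFill, if_neg (by simp : ¬("." : String) ≠ ".")]
        exact congrArg _ (ih s' a (by simpa using hcnt))
    · have hcnt : t.count "." ≤ s.length := by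
        have : (x :: t).count "." = t.count "." := by simp [hx]
        omega
      simp only [pvFill, if_pos (by simpa using hx : (x : String) ≠ ".")]
      exact congrArg _ (ih s a hcnt)

-- B's port, written with ndFilter (definitional unfolding of the let)
theorem alt_eq (l : List String) :
    compact_puzzle_alt l = pvFill (l.take (ndFilter l).length) (ndFilter l).reverse := rfl

theorem main_eq : ∀ (l : List String), pvTrim ((pvF l).1) = compact_puzzle_alt l := by
  intro l
  induction l using pvF.induct with
  | case1 =>
    rw [pvF_nil, alt_eq]
    exact pvTrim_allDots (by simp)
  | case2 xs y t hrm ih =>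
    obtain ⟨hy, hfil, hlast, htake⟩ := rmR_some_spec hrm
    rw [pvF_cons_dot_some hrm]
    rw [pvTrim_cons_nondot _ hy, ih]
    obtain ⟨ys, hys⟩ := List.getLast?_eq_some_iff.mp hlast
    rw [alt_eq, alt_eq, ndFilter_cons_dot, hys, hfil, hys, List.dropLast_concat]
    have hlen : (ys ++ [y]).length = ys.length + 1 := by simp
    rw [hlen]
    have htk : ("." :: xs).take (ys.length + 1) = "." :: xs.take ys.length :=
      List.take_succ_cons
    rw [htk]
    have hrev : (ys ++ [y]).reverse = y :: ys.reverse := by simp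
    rw [hrev]
    simp only [pvFill, if_neg (by simp : ¬("." : String) ≠ ".")]
    have htt : t.take ys.length = xs.take ys.length := htake ys.length (by rw [hys]; simp)
    rw [htt]
  | case3 xs hrm ih =>
    have hall : ∀ z ∈ xs, z = "." := rmR_none_iff.mp hrm
    rw [pvF_cons_dot_none hrm, pvF_allDots hall]
    rw [pvTrim_allDots (by
      intro z hz
      cases hz with
      | head => rfl
      | tail _ hz => exact hall z hz)]
    rw [alt_eq, ndFilter_cons_dot, ndFilter_eq_nil hall]
    rfl
  | case4 x xs hx ih =>
    rw [pvF_cons_nondot hx]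
    rw [pvTrim_cons_nondot _ hx, ih]
    rw [alt_eq, alt_eq, ndFilter_cons_nondot _ hx]
    have hlen : (x :: ndFilter xs).length = (ndFilter xs).length + 1 := by simp
    rw [hlen]
    have htk : (x :: xs).take ((ndFilter xs).length + 1) = x :: xs.take (ndFilter xs).length :=
      List.take_succ_cons
    rw [htk]
    have hrev : (x :: ndFilter xs).reverse = (ndFilter xs).reverse ++ [x] := by simp
    rw [hrev]
    simp only [pvFill, if_pos (by simpa using hx : (x : String) ≠ ".")]
    rw [pvFill_stack _ _ _ (by
      calc (xs.take (ndFilter xs).length).count "." ≤ (xs.take (ndFilter xs).length).length :=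
            List.count_le_length
        _ ≤ (ndFilter xs).length := by simp
        _ = (ndFilter xs).reverse.length := by simp)]

-- ===== VERDICT (by name: the statement is the Claim_ definition above) =====
theorem compact_puzzle_spec : Claim_equal_compact_puzzle := by
  intro l _
  show compact_puzzle l = compact_puzzle_alt l
  rw [compact_puzzle, pvWhile_eq, main_eq]
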